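-- pv_equiv track=rewrite | github.com/Per4ML/per4ml.github.io | updatehtml.py | parsepubs
-- ===== SOURCE A (Python) =====
-- def parsepubs(contents):
--   lines = ['<dl style="margin-bottom:80px;">']
--   indt = False
--   for line in contents:
--     if line == '':
--       indt = False
--     elif not indt:
--       lines.append('<dt>' + line + '</dt>')
--       indt = True
--     else:
--       lines.append('<dd>' + line + '</dd>')
--   lines.append('</dl>')
--   return lines
-- ===== SOURCE B (Python) =====
-- def parsepubs(contents):
--   # group-then-render: split into blocks of consecutive non-empty lines, then render each
--   blocks = []
--   cur = []
--   for line in contents: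
--     if line == '':
--       if cur:
--         blocks.append(cur)
--       cur = []
--     else:
--       cur.append(line)
--   if cur:
--     blocks.append(cur)
--   body = []
--   for b in blocks:
--     body.append('<dt>' + b[0] + '</dt>')
--     body.extend('<dd>' + x + '</dd>' for x in b[1:])
--   return ['<dl style="margin-bottom:80px;">'] + body + ['</dl>']
-- ===== Notes on version B (the rewrite author's own statement) =====
-- stated objective: alternative
-- what changed: Replaces the running indt flag with an explicit two-phase structure: first partition the lines into blocks of consecutive non-empty lines, then render each block as one <dt> plus <dd>s.
import Mathlib
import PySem

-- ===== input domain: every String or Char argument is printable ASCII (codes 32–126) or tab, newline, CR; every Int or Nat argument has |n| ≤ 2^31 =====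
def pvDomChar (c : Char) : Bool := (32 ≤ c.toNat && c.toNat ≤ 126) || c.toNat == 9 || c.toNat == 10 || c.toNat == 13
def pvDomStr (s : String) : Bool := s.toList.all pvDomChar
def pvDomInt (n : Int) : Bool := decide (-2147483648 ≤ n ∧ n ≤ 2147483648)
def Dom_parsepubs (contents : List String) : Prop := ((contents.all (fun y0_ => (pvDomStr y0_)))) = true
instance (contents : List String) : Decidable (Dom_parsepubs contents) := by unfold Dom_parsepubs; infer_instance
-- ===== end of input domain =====

-- ===== PORT A =====
-- transliteration of A: one pass with a running indt flag over (lines, indt)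
def pvStepA (st : List String × Bool) (line : String) : List String × Bool :=
  if line = "" then (st.1, false)
  else if !st.2 then (st.1 ++ ["<dt>" ++ line ++ "</dt>"], true)
  else (st.1 ++ ["<dd>" ++ line ++ "</dd>"], st.2)

def parsepubs (contents : List String) : List String :=
  (contents.foldl pvStepA (["<dl style=\"margin-bottom:80px;\">"], false)).1 ++ ["</dl>"]

-- ===== PORT B =====
-- B: first pass groups consecutive non-empty lines into blocks, second pass renders
def pvStepB (st : List (List String) × List String) (line : String) : List (List String) × List String :=
  if line = "" then (if st.2.isEmpty then st.1 else st.1 ++ [st.2], [])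
  else (st.1, st.2 ++ [line])

def pvFlush (st : List (List String) × List String) : List (List String) :=
  if st.2.isEmpty then st.1 else st.1 ++ [st.2]

def pvRenderBlock (b : List String) : List String :=
  match b with
  | [] => []
  | h :: t => ("<dt>" ++ h ++ "</dt>") :: t.map (fun x => "<dd>" ++ x ++ "</dd>")

def parsepubs_alt (contents : List String) : List String :=
  let blocks := pvFlush (contents.foldl pvStepB ([], []))
  ["<dl style=\"margin-bottom:80px;\">"] ++ blocks.flatMap pvRenderBlock ++ ["</dl>"]

-- ===== PRECONDITION & SPEC =====
def Spec_parsepubs (contents : List String) (out : List String) : Prop := out = parsepubs_alt contents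
instance (contents : List String) (out : List String) : Decidable (Spec_parsepubs contents out) := by unfold Spec_parsepubs; infer_instance

-- ===== CLAIM (what is proved, stated in full; the proofs are below) =====
def Claim_equal_parsepubs : Prop := ∀ (contents : List String), Dom_parsepubs contents → Spec_parsepubs contents (parsepubs contents)

-- ===== LEMMAS AND PROOFS =====
theorem pvRenderBlock_append (cur : List String) (line : String) (h : cur ≠ []) :
    pvRenderBlock (cur ++ [line]) = pvRenderBlock cur ++ ["<dd>" ++ line ++ "</dd>"] := by
  cases cur with
  | nil => exact absurd rfl h
  | cons a t => simp [pvRenderBlock]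

theorem pv_key (contents : List String) : ∀ (blocks : List (List String)) (cur pre : List String),
    (contents.foldl pvStepA (pre ++ blocks.flatMap pvRenderBlock ++ pvRenderBlock cur, !cur.isEmpty)).1
      = pre ++ (pvFlush (contents.foldl pvStepB (blocks, cur))).flatMap pvRenderBlock := by
  induction contents with
  | nil =>
    intro blocks cur pre
    cases cur with
    | nil => simp [pvFlush, pvRenderBlock]
    | cons a t => simp [pvFlush, pvRenderBlock]
  | cons line rest ih =>
    intro blocks cur pre
    by_cases hline : line = ""
    · subst hline
      cases cur with
      | nil =>
        simpa [pvStepA, pvStepB, pvRenderBlock] using ih blocks [] pre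
      | cons a t =>
        have := ih (blocks ++ [a :: t]) [] pre
        simpa [pvStepA, pvStepB, pvRenderBlock] using this
    · cases cur with
      | nil =>
        have := ih blocks [line] pre
        simpa [pvStepA, pvStepB, pvRenderBlock, hline] using this
      | cons a t =>
        have := ih blocks ((a :: t) ++ [line]) pre
        rw [pvRenderBlock_append (a :: t) line (by simp)] at this
        simpa [pvStepA, pvStepB, hline] using this

-- ===== VERDICT (by name: the statement is the Claim_ definition above) =====
theorem parsepubs_spec : Claim_equal_parsepubs := by
  intro contents _
  show parsepubs contents = parsepubs_alt contents
  have := pv_key contents [] [] ["<dl style=\"margin-bottom:80px;\">"]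
  simp only [parsepubs, parsepubs_alt]
  simp only [pvRenderBlock, List.flatMap_nil, List.append_nil, List.isEmpty_nil, Bool.not_true] at this
  rw [this]
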